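-- pv_equiv track=rewrite | github.com/mollyhan19/Cognitext | scripts/fetch_wiki_articles.py | filter_candidates
-- ===== SOURCE A (Python) =====
-- from typing import List, Dict, Optional
--
-- def filter_candidates(candidates: List[str]) -> List[str]:
--     """Filter out obviously unsuitable candidates before LLM evaluation."""
--     filtered = []
--     for title in candidates:
--         # Skip meta pages and other unsuitable articles
--         if any(x in title for x in [
--             'Category:', 'Template:', 'Wikipedia:',
--             'Help:', 'File:', 'Talk:', 'User:',
--             'disambiguation', 'List of'
--         ]):
--             continue
--         filtered.append(title)
--     return filtered
-- ===== SOURCE B (Python) =====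
-- _BY_FIRST = {
--     'C': ('Category:',),
--     'T': ('Template:', 'Talk:'),
--     'W': ('Wikipedia:',),
--     'H': ('Help:',),
--     'F': ('File:',),
--     'U': ('User:',),
--     'd': ('disambiguation',),
--     'L': ('List of',),
-- }
--
--
-- def _suitable(title):
--     # single left-to-right scan; at each position only the patterns whose
--     # first character matches are tried
--     for i in range(len(title)):
--         for p in _BY_FIRST.get(title[i], ()):
--             if title.startswith(p, i):
--                 return False
--     return True
--
--
-- def filter_candidates(candidates):
--     """Filter out obviously unsuitable candidates before LLM evaluation."""
--     return [t for t in candidates if _suitable(t)]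
-- ===== Notes on version B (the rewrite author's own statement) =====
-- stated objective: alternative
-- what changed: Replaces the per-title any() loop over nine substring searches by a single left-to-right scan of the title with a first-character dispatch table, trying at each position only the patterns that can start there, and builds the result with a comprehension over a suitability predicate instead of a loop with continue/append.
import Mathlib
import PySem

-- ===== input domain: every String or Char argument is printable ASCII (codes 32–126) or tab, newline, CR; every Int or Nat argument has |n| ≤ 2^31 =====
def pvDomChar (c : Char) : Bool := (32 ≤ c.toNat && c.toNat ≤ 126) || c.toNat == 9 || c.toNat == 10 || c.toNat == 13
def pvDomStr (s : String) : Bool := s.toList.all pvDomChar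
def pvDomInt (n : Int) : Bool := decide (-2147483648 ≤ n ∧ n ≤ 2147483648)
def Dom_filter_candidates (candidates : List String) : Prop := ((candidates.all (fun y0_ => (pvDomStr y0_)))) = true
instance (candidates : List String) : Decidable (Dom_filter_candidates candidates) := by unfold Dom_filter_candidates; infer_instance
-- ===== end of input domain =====

-- B replaces A's per-title any() over nine substring searches by a single left-to-right
-- scan of the title with a first-character dispatch table (objective: alternative).

-- ===== PORT A =====
-- the fixed list of unsuitable markers, as in A's `any(x in title for x in [...])`
def pvPats : List String :=
  ["Category:", "Template:", "Wikipedia:", "Help:", "File:", "Talk:", "User:", "disambiguation", "List of"]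

def filter_candidates (candidates : List String) : List String :=
  candidates.foldl
    (fun filtered title =>
      if pvPats.any (fun x => PySem.Str.isIn x title) then filtered
      else filtered ++ [title])
    []

-- ===== PORT B =====
-- the _BY_FIRST dispatch dict of Source B: patterns grouped by their first character
def pvByFirst (c : Char) : List (List Char) :=
  if c = 'C' then ["Category:".toList]
  else if c = 'T' then ["Template:".toList, "Talk:".toList]
  else if c = 'W' then ["Wikipedia:".toList]
  else if c = 'H' then ["Help:".toList]
  else if c = 'F' then ["File:".toList]
  else if c = 'U' then ["User:".toList]
  else if c = 'd' then ["disambiguation".toList]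
  else if c = 'L' then ["List of".toList]
  else []

-- Source B's _suitable: scan the title left to right; at each position try only the
-- patterns whose first character matches (title.startswith(p, i) ≙ isPrefixOf on the suffix)
def pvSuitable : List Char → Bool
  | [] => true
  | c :: rest =>
    if (pvByFirst c).any (fun p => p.isPrefixOf (c :: rest)) then false
    else pvSuitable rest

def filter_candidates_alt (candidates : List String) : List String :=
  candidates.filter (fun t => pvSuitable t.toList)

-- ===== PRECONDITION & SPEC =====
def Spec_filter_candidates (candidates : List String) (out : List String) : Prop := out = filter_candidates_alt candidates
instance (candidates : List String) (out : List String) : Decidable (Spec_filter_candidates candidates out) := by unfold Spec_filter_candidates; infer_instance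

-- ===== CLAIM (what is proved, stated in full; the proofs are below) =====
def Claim_equal_filter_candidates : Prop := ∀ (candidates : List String), Dom_filter_candidates candidates → Spec_filter_candidates candidates (filter_candidates candidates)

-- ===== LEMMAS AND PROOFS =====

-- A's pattern list as char lists
def pvPatsC : List (List Char) := pvPats.map String.toList

theorem pvTl1 : "Category:".toList = 'C' :: "ategory:".toList := rfl
theorem pvTl2 : "Template:".toList = 'T' :: "emplate:".toList := rfl
theorem pvTl3 : "Wikipedia:".toList = 'W' :: "ikipedia:".toList := rfl
theorem pvTl4 : "Help:".toList = 'H' :: "elp:".toList := rfl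
theorem pvTl5 : "File:".toList = 'F' :: "ile:".toList := rfl
theorem pvTl6 : "Talk:".toList = 'T' :: "alk:".toList := rfl
theorem pvTl7 : "User:".toList = 'U' :: "ser:".toList := rfl
theorem pvTl8 : "disambiguation".toList = 'd' :: "isambiguation".toList := rfl
theorem pvTl9 : "List of".toList = 'L' :: "ist of".toList := rfl

-- a pattern whose first character differs cannot be a prefix
theorem pvPrefixNe (a : Char) (as : List Char) (c : Char) (rest : List Char) (h : ¬ c = a) :
    (a :: as).isPrefixOf (c :: rest) = false := by
  rw [show ((a :: as).isPrefixOf (c :: rest)) = (a == c && as.isPrefixOf rest) from rfl]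
  have hac : a ≠ c := fun e => h e.symm
  simp [hac]

-- the first-character dispatch tries exactly the patterns that can match at this position
theorem pvDispatch (c : Char) (rest : List Char) :
    (pvByFirst c).any (fun p => p.isPrefixOf (c :: rest)) =
      pvPatsC.any (fun p => p.isPrefixOf (c :: rest)) := by
  unfold pvByFirst pvPatsC pvPats
  split_ifs with h1 h2 h3 h4 h5 h6 h7 h8 <;>
    subst_vars <;>
    simp_all [pvTl1, pvTl2, pvTl3, pvTl4, pvTl5, pvTl6, pvTl7, pvTl8, pvTl9, pvPrefixNe]

theorem pvIsInCons (p : List Char) (c : Char) (rest : List Char) :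
    PySem.Chars.isIn p (c :: rest) = (p.isPrefixOf (c :: rest) || PySem.Chars.isIn p rest) := by
  rw [Bool.eq_iff_iff]
  simp [PySem.Chars.isIn_iff_infix, List.infix_cons_iff, List.isPrefixOf_iff_prefix]

theorem pvAnyOr (xs : List (List Char)) (f g : List Char → Bool) :
    xs.any (fun p => f p || g p) = (xs.any f || xs.any g) := by
  rw [Bool.eq_iff_iff]
  simp only [List.any_eq_true, Bool.or_eq_true]
  constructor
  · rintro ⟨x, hx, h | h⟩
    exacts [Or.inl ⟨x, hx, h⟩, Or.inr ⟨x, hx, h⟩]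
  · rintro (⟨x, hx, h⟩ | ⟨x, hx, h⟩)
    exacts [⟨x, hx, Or.inl h⟩, ⟨x, hx, Or.inr h⟩]

-- B's scan finds a pattern exactly when A's substring tests do
theorem pvSuitable_eq (cs : List Char) :
    pvSuitable cs = !(pvPatsC.any (fun p => PySem.Chars.isIn p cs)) := by
  induction cs with
  | nil => decide
  | cons c rest ih =>
    have h1 : pvPatsC.any (fun p => PySem.Chars.isIn p (c :: rest)) =
        (pvPatsC.any (fun p => p.isPrefixOf (c :: rest)) ||
          pvPatsC.any (fun p => PySem.Chars.isIn p rest)) := by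
      rw [← pvAnyOr]
      simp only [pvIsInCons]
    rw [pvSuitable, pvDispatch, h1]
    cases h : pvPatsC.any (fun p => p.isPrefixOf (c :: rest)) <;> simp [ih]

-- A's foldl with continue/append is a filter
theorem pvFoldl_filter (candidates : List String) (p : String → Bool) :
    candidates.foldl (fun acc t => if p t then acc else acc ++ [t]) [] =
      candidates.filter (fun t => !p t) := by
  have hf : (fun (acc : List String) t => if p t then acc else acc ++ [t]) =
      (fun acc t => if !p t then acc ++ [id t] else acc) := by
    funext acc t
    cases h : p t <;> simp
  rw [hf, PySem.List.foldl_append_if (fun t => !p t) id candidates []]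
  simp

theorem pvTitle_eq (t : String) :
    pvSuitable t.toList = !(pvPats.any (fun x => PySem.Str.isIn x t)) := by
  rw [pvSuitable_eq]
  unfold pvPatsC
  rw [List.any_map]
  simp [Function.comp_def]

-- ===== VERDICT (by name: the statement is the Claim_ definition above) =====
theorem filter_candidates_spec : Claim_equal_filter_candidates := by
  intro candidates _
  unfold Spec_filter_candidates filter_candidates filter_candidates_alt
  rw [pvFoldl_filter candidates (fun t => pvPats.any (fun x => PySem.Str.isIn x t))]
  exact List.filter_congr (fun t _ => (pvTitle_eq t).symm)
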